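-- pv_equiv track=rewrite | github.com/kaluginpeter/Algorithms_and_structures_tasks | CodeWars/7kyu/Dinner_Plans.py | common_ground
-- ===== SOURCE A (Python) =====
-- def common_ground(s1,s2):
--     hashmap: dict[str, int] = dict()
--     output: list[str] = []
--     idx: int = 0
--     for word in s2.split():
--         if word not in hashmap:
--             hashmap[word] = idx
--         idx += 1
--     for word in set(s1.split()):
--         if word in hashmap:
--             output.append(word)
--     output.sort(key=lambda word: hashmap[word])
--     return ' '.join(output) if output else 'death'
-- ===== SOURCE B (Python) =====
-- def common_ground(s1, s2):
--     s1set = set(s1.split())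
--     seen = set()
--     output = []
--     for w in s2.split():
--         if w in s1set and w not in seen:
--             seen.add(w)
--             output.append(w)
--     return ' '.join(output) if output else 'death'
-- ===== Notes on version B (the rewrite author's own statement) =====
-- stated objective: simpler
-- what changed: B replaces A's first-occurrence-index dict, iteration over set(s1.split()) and final sort by index with a single ordered pass over s2.split() that keeps a 'seen' set, so the output order comes from traversal instead of sorting.
import Mathlib
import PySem

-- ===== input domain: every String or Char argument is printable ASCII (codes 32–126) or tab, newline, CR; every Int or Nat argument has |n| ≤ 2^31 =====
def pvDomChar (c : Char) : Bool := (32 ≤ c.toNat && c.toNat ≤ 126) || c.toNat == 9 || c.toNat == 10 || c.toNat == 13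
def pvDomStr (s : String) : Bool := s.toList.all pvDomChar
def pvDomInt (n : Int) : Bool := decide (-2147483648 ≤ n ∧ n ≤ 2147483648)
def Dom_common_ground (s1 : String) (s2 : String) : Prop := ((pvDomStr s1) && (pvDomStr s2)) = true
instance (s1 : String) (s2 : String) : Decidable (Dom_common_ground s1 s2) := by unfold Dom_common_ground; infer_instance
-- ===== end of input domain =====

-- B replaces A's first-occurrence-index dict + sort with one ordered pass over s2's words and a 'seen' set (simpler; same results).

-- ===== PORT A =====
def common_ground (s1 : String) (s2 : String) : String :=
  let st := (PySem.Str.split₀ s2).foldl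
    (fun (p : PySem.Dict String Int × Int) word =>
      (if p.1.contains word then p.1 else p.1.insert word p.2, p.2 + 1))
    (PySem.Dict.empty, 0)
  let output := (PySem.Set.ofList (PySem.Str.split₀ s1)).foldl
    (fun out word => if st.1.contains word then out ++ [word] else out) []
  let sortedOutput := PySem.List.sorted output (fun word => st.1.getD word 0) false
  if sortedOutput.isEmpty then "death" else PySem.Str.join " " sortedOutput

-- ===== PORT B =====
def common_ground_alt (s1 : String) (s2 : String) : String :=
  let s1set := PySem.Set.ofList (PySem.Str.split₀ s1)
  let st := (PySem.Str.split₀ s2).foldl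
    (fun (p : PySem.Set String × List String) w =>
      if s1set.contains w && !(PySem.Set.contains p.1 w) then (PySem.Set.add p.1 w, p.2 ++ [w]) else p)
    (PySem.Set.empty, [])
  if st.2.isEmpty then "death" else PySem.Str.join " " st.2

-- ===== PRECONDITION & SPEC =====
def Spec_common_ground (s1 : String) (s2 : String) (out : String) : Prop := out = common_ground_alt s1 s2
instance (s1 : String) (s2 : String) (out : String) : Decidable (Spec_common_ground s1 s2 out) := by unfold Spec_common_ground; infer_instance

-- ===== CLAIM (what is proved, stated in full; the proofs are below) =====
def Claim_equal_common_ground : Prop := ∀ (s1 : String) (s2 : String), Dom_common_ground s1 s2 → Spec_common_ground s1 s2 (common_ground s1 s2)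

-- ===== LEMMAS AND PROOFS =====

-- ordered first-occurrence elements of a list that are new relative to `seen`
def pvDedupFrom (seen : PySem.Set String) : List String → List String
  | [] => []
  | w :: ws => if PySem.Set.contains seen w then pvDedupFrom seen ws
               else w :: pvDedupFrom (PySem.Set.add seen w) ws

-- B's loop body as a dedup-filter
def pvDedupF (S seen : PySem.Set String) : List String → List String
  | [] => []
  | w :: ws => if PySem.Set.contains S w && !(PySem.Set.contains seen w)
               then w :: pvDedupF S (PySem.Set.add seen w) ws
               else pvDedupF S seen ws

lemma pv_foldl_add_eq (ws : List String) (seen : PySem.Set String) :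
    ws.foldl PySem.Set.add seen = seen ++ pvDedupFrom seen ws := by
  induction ws generalizing seen with
  | nil => simp [pvDedupFrom]
  | cons w ws ih =>
    rw [List.foldl_cons, ih]
    by_cases h : PySem.Set.contains seen w = true
    · rw [pvDedupFrom, if_pos h]
      have : PySem.Set.add seen w = seen := by rw [PySem.Set.add, if_pos h]
      rw [this]
    · rw [pvDedupFrom, if_neg h]
      have : PySem.Set.add seen w = seen ++ [w] := by rw [PySem.Set.add, if_neg h]
      rw [this, List.append_assoc]
      rfl

lemma pv_B_loop (S : PySem.Set String) (ws : List String) (seen : PySem.Set String) (acc : List String) :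
    (ws.foldl
      (fun (p : PySem.Set String × List String) w =>
        if S.contains w && !(PySem.Set.contains p.1 w) then (PySem.Set.add p.1 w, p.2 ++ [w]) else p)
      (seen, acc)).2 = acc ++ pvDedupF S seen ws := by
  induction ws generalizing seen acc with
  | nil => simp [pvDedupF]
  | cons w ws ih =>
    rw [List.foldl_cons]
    by_cases h : (S.contains w && !(PySem.Set.contains seen w)) = true
    · rw [if_pos h, pvDedupF, if_pos h, ih, List.append_assoc]
      rfl
    · rw [if_neg h, pvDedupF, if_neg h, ih]

lemma pv_dedupF_eq (S : PySem.Set String) (ws : List String) (seen1 seen2 : PySem.Set String)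
    (h : ∀ x, S.contains x = true → (x ∈ seen1 ↔ x ∈ seen2)) :
    pvDedupF S seen1 ws = (pvDedupFrom seen2 ws).filter (fun w => S.contains w) := by
  induction ws generalizing seen1 seen2 with
  | nil => simp [pvDedupF, pvDedupFrom]
  | cons w ws ih =>
    by_cases hS : S.contains w = true
    · have hmS : w ∈ S := (PySem.Set.contains_iff _ _).mp hS
      by_cases h2 : w ∈ seen2
      · have hm1 : w ∈ seen1 := (h w hS).mpr h2
        have h2' : PySem.Set.contains seen2 w = true := (PySem.Set.contains_iff _ _).mpr h2
        rw [pvDedupF, if_neg (by simp [hm1]), pvDedupFrom, if_pos h2']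
        exact ih seen1 seen2 h
      · have hn1 : w ∉ seen1 := fun hm => h2 ((h w hS).mp hm)
        rw [pvDedupF, if_pos (by simp [hmS, hn1]), pvDedupFrom, if_neg (by simp [h2]),
          List.filter_cons_of_pos hS]
        congr 1
        refine ih _ _ ?_
        intro x hx
        rw [PySem.Set.mem_add, PySem.Set.mem_add, h x hx]
    · have hnS : w ∉ S := fun hm => hS ((PySem.Set.contains_iff _ _).mpr hm)
      by_cases h2 : PySem.Set.contains seen2 w = true
      · rw [pvDedupF, if_neg (by simp [hnS]), pvDedupFrom, if_pos h2]
        exact ih seen1 seen2 h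
      · rw [pvDedupF, if_neg (by simp [hnS]), pvDedupFrom, if_neg h2,
          List.filter_cons_of_neg (by simpa using hnS)]
        refine ih seen1 (PySem.Set.add seen2 w) ?_
        intro x hx
        rw [PySem.Set.mem_add]
        have hxw : x ≠ w := by rintro rfl; exact hnS ((PySem.Set.contains_iff _ _).mp hx)
        rw [h x hx]
        exact ⟨Or.inl, fun hm => hm.elim id (fun he => absurd he hxw)⟩

-- A's dict loop: contains
lemma pv_A_contains (ws : List String) (d : PySem.Dict String Int) (i : Int) (w : String) :
    ((ws.foldl
      (fun (p : PySem.Dict String Int × Int) word =>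
        (if p.1.contains word then p.1 else p.1.insert word p.2, p.2 + 1))
      (d, i)).1).contains w = (d.contains w || decide (w ∈ ws)) := by
  induction ws generalizing d i with
  | nil => simp
  | cons w' ws ih =>
    by_cases h : d.contains w' = true
    · simp only [List.foldl_cons, h, if_true, ih, List.mem_cons]
      by_cases hw : w = w'
      · subst hw; simp [h]
      · simp [hw]
    · have h' : d.contains w' = false := Bool.eq_false_iff.mpr h
      simp only [List.foldl_cons, h', Bool.false_eq_true, if_false, ih, List.mem_cons,
        PySem.Dict.contains_insert]
      by_cases hw : w = w'
      · subst hw; simp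
      · have hbeq : (w == w') = false := beq_eq_false_iff_ne.mpr hw
        simp [hbeq, hw]

-- A's dict loop: existing keys keep their value
lemma pv_A_keep (ws : List String) (d : PySem.Dict String Int) (i : Int) (w : String)
    (hc : d.contains w = true) :
    ((ws.foldl
      (fun (p : PySem.Dict String Int × Int) word =>
        (if p.1.contains word then p.1 else p.1.insert word p.2, p.2 + 1))
      (d, i)).1).get? w = d.get? w := by
  induction ws generalizing d i with
  | nil => simp
  | cons w' ws ih =>
    by_cases h : d.contains w' = true
    · simp only [List.foldl_cons, h, if_true]
      exact ih d (i + 1) hc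
    · have h' : d.contains w' = false := Bool.eq_false_iff.mpr h
      have hne : w ≠ w' := by rintro rfl; rw [hc] at h'; cases h'
      simp only [List.foldl_cons, h', Bool.false_eq_true, if_false]
      rw [ih (d.insert w' i) (i + 1) (by simp [PySem.Dict.contains_insert, hc])]
      exact PySem.Dict.get?_insert_of_ne _ _ hne

-- A's dict loop: a fresh key gets its first index
lemma pv_A_fresh (ws : List String) (d : PySem.Dict String Int) (i : Int) (w : String)
    (hc : d.contains w = false) (hm : w ∈ ws) :
    ((ws.foldl
      (fun (p : PySem.Dict String Int × Int) word =>
        (if p.1.contains word then p.1 else p.1.insert word p.2, p.2 + 1))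
      (d, i)).1).get? w = some (i + ((PySem.List.index? ws w).getD 0 : Nat)) := by
  induction ws generalizing d i with
  | nil => cases hm
  | cons w' ws ih =>
    by_cases hw : w = w'
    · subst hw
      simp only [List.foldl_cons, hc, Bool.false_eq_true, if_false]
      rw [pv_A_keep ws (d.insert w i) (i + 1) w (by simp)]
      rw [PySem.Dict.get?_insert_self]
      rw [PySem.List.index?_cons_self]
      simp
    · have hm' : w ∈ ws := by cases hm with | head => exact absurd rfl hw | tail _ h => exact h
      have hidx := PySem.List.index?_isSome_iff (xs := ws) (v := w) |>.mpr hm'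
      obtain ⟨k, hk⟩ := Option.isSome_iff_exists.mp hidx
      by_cases h : d.contains w' = true
      · simp only [List.foldl_cons, h, if_true]
        rw [ih d (i + 1) hc hm']
        rw [PySem.List.index?_cons_of_ne ws (Ne.symm hw), hk]
        simp; ring
      · have h' : d.contains w' = false := Bool.eq_false_iff.mpr h
        simp only [List.foldl_cons, h', Bool.false_eq_true, if_false]
        rw [ih (d.insert w' i) (i + 1) (by simp [PySem.Dict.contains_insert, hc, hw]) hm']
        rw [PySem.List.index?_cons_of_ne ws (Ne.symm hw), hk]
        simp; ring

-- first-occurrence lists are strictly increasing in first index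
lemma pv_pairwise_index (xs : List String) :
    (PySem.Set.ofList xs).Pairwise
      (fun a b => (PySem.List.index? xs a).getD 0 < (PySem.List.index? xs b).getD 0) := by
  induction xs using List.reverseRecOn with
  | nil => simp [PySem.Set.ofList]
  | append_singleton xs x ih =>
    have hof : PySem.Set.ofList (xs ++ [x]) = PySem.Set.add (PySem.Set.ofList xs) x := by
      rw [PySem.Set.ofList_eq_foldl, PySem.Set.ofList_eq_foldl, List.foldl_append]
      rfl
    have hkeep : ∀ a, a ∈ xs → PySem.List.index? (xs ++ [x]) a = PySem.List.index? xs a :=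
      fun a ha => PySem.List.index?_append_of_mem [x] ha
    by_cases hx : x ∈ xs
    · have : PySem.Set.add (PySem.Set.ofList xs) x = PySem.Set.ofList xs := by
        simp [PySem.Set.add, PySem.Set.mem_ofList, hx]
      rw [hof, this]
      refine ih.imp_of_mem ?_
      intro a b ha hb hab
      have ha' := (PySem.Set.mem_ofList _ _).mp ha
      have hb' := (PySem.Set.mem_ofList _ _).mp hb
      rwa [hkeep a ha', hkeep b hb']
    · have : PySem.Set.add (PySem.Set.ofList xs) x = PySem.Set.ofList xs ++ [x] := by
        simp [PySem.Set.add, PySem.Set.mem_ofList, hx]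
      rw [hof, this, List.pairwise_append]
      refine ⟨?_, by simp, ?_⟩
      · refine ih.imp_of_mem ?_
        intro a b ha hb hab
        have ha' := (PySem.Set.mem_ofList _ _).mp ha
        have hb' := (PySem.Set.mem_ofList _ _).mp hb
        rwa [hkeep a ha', hkeep b hb']
      · intro a ha b hb
        have ha' := (PySem.Set.mem_ofList _ _).mp ha
        have hb' : b = x := by simpa using hb
        subst hb'
        rw [hkeep a ha', PySem.List.index?_append_singleton_self xs b hx]
        have hidx := PySem.List.index?_isSome_iff (xs := xs) (v := a) |>.mpr ha'
        obtain ⟨k, hk⟩ := Option.isSome_iff_exists.mp hidx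
        obtain ⟨hklt, -, -⟩ := PySem.List.getElem_of_index?_eq_some hk
        rw [hk]
        simpa using hklt

-- the two filtered first-occurrence lists are permutations of each other
lemma pv_perm (w1 w2 : List String) :
    ((PySem.Set.ofList w2).filter (fun w => PySem.Set.contains (PySem.Set.ofList w1) w)).Perm
    ((PySem.Set.ofList w1).filter (fun w => decide (w ∈ w2))) := by
  apply List.perm_of_nodup_nodup_toFinset_eq
  · exact (PySem.Set.nodup_ofList w2).filter _
  · exact (PySem.Set.nodup_ofList w1).filter _
  · ext a
    simp [PySem.Set.mem_ofList, and_comm]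

theorem common_ground_spec : Claim_equal_common_ground := by
  unfold Claim_equal_common_ground Spec_common_ground
  intro s1 s2 _
  unfold common_ground common_ground_alt
  simp only []
  set w1 := PySem.Str.split₀ s1 with hw1
  set w2 := PySem.Str.split₀ s2 with hw2
  set S := PySem.Set.ofList w1 with hS
  -- B's output list
  rw [pv_B_loop S w2 PySem.Set.empty []]
  rw [pv_dedupF_eq S w2 PySem.Set.empty PySem.Set.empty (fun _ _ => Iff.rfl)]
  have hfrom : pvDedupFrom PySem.Set.empty w2 = PySem.Set.ofList w2 := by
    have h0 := pv_foldl_add_eq w2 ([] : List String)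
    rw [← PySem.Set.ofList_eq_foldl] at h0
    simp only [List.nil_append] at h0
    exact h0.symm
  rw [hfrom]
  -- A's dict contains = membership in w2
  have hcont : ∀ w, ((w2.foldl
      (fun (p : PySem.Dict String Int × Int) word =>
        (if p.1.contains word then p.1 else p.1.insert word p.2, p.2 + 1))
      (PySem.Dict.empty, 0)).1).contains w = decide (w ∈ w2) := by
    intro w
    rw [pv_A_contains]
    simp
  -- A's output list = S filtered by membership in w2
  rw [PySem.List.foldl_append_if_eq_filter]
  simp only [List.nil_append]
  rw [List.filter_congr (fun x _ => hcont x)]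
  -- the sort returns B's list
  have hsorted : PySem.List.sorted ((PySem.Set.ofList w1).filter (fun w => decide (w ∈ w2)))
      (fun word => ((w2.foldl
        (fun (p : PySem.Dict String Int × Int) word =>
          (if p.1.contains word then p.1 else p.1.insert word p.2, p.2 + 1))
        (PySem.Dict.empty, 0)).1).getD word 0) false
      = (PySem.Set.ofList w2).filter (fun w => PySem.Set.contains S w) := by
    apply PySem.List.sorted_eq_of_perm_of_pairwise_lt
    · exact pv_perm w1 w2
    · have hpw := (pv_pairwise_index w2).filter (fun w => PySem.Set.contains S w)
      refine hpw.imp_of_mem ?_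
      intro a b ha hb hab
      have ha2 : a ∈ w2 := (PySem.Set.mem_ofList _ _).mp (List.mem_of_mem_filter ha)
      have hb2 : b ∈ w2 := (PySem.Set.mem_ofList _ _).mp (List.mem_of_mem_filter hb)
      have hga := pv_A_fresh w2 PySem.Dict.empty 0 a (by simp) ha2
      have hgb := pv_A_fresh w2 PySem.Dict.empty 0 b (by simp) hb2
      rw [PySem.Dict.getD_eq_get?_getD, PySem.Dict.getD_eq_get?_getD, hga, hgb]
      simpa using hab
  rw [hsorted]
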